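-- pv_equiv track=rewrite | github.com/jwohlin2/CAD_Quoting_Tool | cad_quoter/utils/text.py | _to_noncapturing
-- ===== SOURCE A (Python) =====
-- def _to_noncapturing(expr: str) -> str:
--     """Convert every capturing ``(`` to a non-capturing ``(?:``."""
--
--     out: list[str] = []
--     i = 0
--     while i < len(expr):
--         ch = expr[i]
--         prev = expr[i - 1] if i > 0 else ""
--         nxt = expr[i + 1] if i + 1 < len(expr) else ""
--         if ch == "(" and prev != "\\" and nxt != "?":
--             out.append("(?:")
--             i += 1
--             continue
--         out.append(ch)
--         i += 1
--     return "".join(out)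
-- ===== SOURCE B (Python) =====
-- def _to_noncapturing(expr: str) -> str:
--     """Convert every capturing ``(`` to a non-capturing ``(?:``.
--
--     Splits on "(" once and decides each boundary from the already-built
--     output (its last char is the original char preceding the "(").
--     """
--     parts = expr.split("(")
--     res = parts[0]
--     for part in parts[1:]:
--         if res.endswith("\\") or part.startswith("?"):
--             res += "(" + part
--         else:
--             res += "(?:" + part
--     return res
-- ===== Notes on version B (the rewrite author's own statement) =====
-- stated objective: faster
-- what changed: Replaces the per-character index loop (with prev/next peeks) by a single str.split on the open paren plus a fold over the segments, deciding each boundary from the tail of the accumulated output and the head of the next segment.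
import Mathlib
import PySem

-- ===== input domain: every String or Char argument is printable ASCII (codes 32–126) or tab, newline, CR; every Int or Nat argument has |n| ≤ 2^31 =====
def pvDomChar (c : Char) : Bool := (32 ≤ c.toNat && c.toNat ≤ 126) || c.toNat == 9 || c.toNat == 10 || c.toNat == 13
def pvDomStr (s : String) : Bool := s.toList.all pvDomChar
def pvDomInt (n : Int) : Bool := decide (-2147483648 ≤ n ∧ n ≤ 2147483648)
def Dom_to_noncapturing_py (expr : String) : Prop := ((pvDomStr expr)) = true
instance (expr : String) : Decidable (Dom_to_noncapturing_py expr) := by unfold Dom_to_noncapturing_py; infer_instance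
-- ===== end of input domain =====

-- B replaces A's per-character index loop by split-on-'(' plus a fold over the
-- segments (same O(n) cost, a different decomposition); return values proved equal.


-- ===== PORT A =====
-- A's while-loop over indices; `prev`/`nxt` are the optional neighbour chars
-- ("" sentinels become `none`), the accumulated `out` list is the joined output.
def toNoncapLoopA (cs : List Char) (i : Nat) (out : List Char) : List Char :=
  if i < cs.length then
    let ch := cs.getD i ' '
    let prev : Option Char := if i > 0 then some (cs.getD (i - 1) ' ') else none
    let nxt : Option Char := if i + 1 < cs.length then some (cs.getD (i + 1) ' ') else none
    if ch = '(' ∧ prev ≠ some '\\' ∧ nxt ≠ some '?' then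
      toNoncapLoopA cs (i + 1) (out ++ ['(', '?', ':'])
    else
      toNoncapLoopA cs (i + 1) (out ++ [ch])
  else out
termination_by cs.length - i

def to_noncapturing_py (expr : String) : String :=
  String.mk (toNoncapLoopA expr.toList 0 [])

-- ===== PORT B =====
-- expr.split("(") , exactly Python's single-char str.split (keeps empty segments)
def splitParB : List Char → List (List Char)
  | [] => [[]]
  | c :: cs =>
    if c = '(' then [] :: splitParB cs
    else match splitParB cs with
         | [] => [[c]]        -- unreachable: splitParB never returns []
         | p :: ps => (c :: p) :: ps

-- loop body: res.endswith("\\") / part.startswith("?") are the last/first-char tests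
def stepB (res part : List Char) : List Char :=
  if res.getLast? = some '\\' ∨ part.head? = some '?' then res ++ '(' :: part
  else res ++ '(' :: '?' :: ':' :: part

def to_noncapturing_py_alt (expr : String) : String :=
  match splitParB expr.toList with
  | [] => ""                  -- unreachable: split never yields an empty list
  | p0 :: rest => String.mk (rest.foldl stepB p0)

-- ===== PRECONDITION & SPEC =====
def Spec_to_noncapturing_py (expr : String) (out : String) : Prop := out = to_noncapturing_py_alt expr
instance (expr : String) (out : String) : Decidable (Spec_to_noncapturing_py expr out) := by unfold Spec_to_noncapturing_py; infer_instance

-- ===== CLAIM (what is proved, stated in full; the proofs are below) =====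
def Claim_equal_to_noncapturing_py : Prop := ∀ (expr : String), Dom_to_noncapturing_py expr → Spec_to_noncapturing_py expr (to_noncapturing_py expr)

-- ===== LEMMAS AND PROOFS =====

-- common characterisation: one pass carrying the previous char
def fSpec : Option Char → List Char → List Char
  | _, [] => []
  | prev, c :: cs =>
    if c = '(' ∧ prev ≠ some '\\' ∧ cs.head? ≠ some '?' then
      '(' :: '?' :: ':' :: fSpec (some c) cs
    else c :: fSpec (some c) cs

-- B's fold over the split, started from an already-built prefix `res`
def runB (res cs : List Char) : List Char :=
  match splitParB cs with
  | [] => res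
  | p0 :: rest => List.foldl stepB (res ++ p0) rest

lemma splitParB_ne_nil (cs : List Char) : splitParB cs ≠ [] := by
  cases cs with
  | nil => simp [splitParB]
  | cons c cs =>
    simp only [splitParB]
    split
    · simp
    · cases h : splitParB cs <;> simp

lemma runB_of_split (res : List Char) (cs : List Char) (p0 : List Char)
    (rest : List (List Char)) (h : splitParB cs = p0 :: rest) :
    runB res cs = List.foldl stepB (res ++ p0) rest := by
  unfold runB; rw [h]

-- head of the first segment is '?' exactly when the string starts with '?'
lemma splitParB_head?_eq (cs : List Char) (hq : cs.head? = some '?') :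
    ∃ p ps, splitParB cs = p :: ps ∧ p.head? = some '?' := by
  cases cs with
  | nil => simp at hq
  | cons c cs =>
    simp only [List.head?_cons, Option.some.injEq] at hq
    subst hq
    simp only [splitParB]
    rw [if_neg (by decide)]
    cases h : splitParB cs with
    | nil => exact ⟨['?'], [], rfl, rfl⟩
    | cons p ps => exact ⟨'?' :: p, ps, rfl, rfl⟩

lemma splitParB_head?_ne (cs : List Char) (hq : cs.head? ≠ some '?')
    (p : List Char) (ps : List (List Char)) (h : splitParB cs = p :: ps) :
    p.head? ≠ some '?' := by
  cases cs with
  | nil =>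
    simp only [splitParB, List.cons.injEq] at h
    rw [← h.1]; simp
  | cons c cs =>
    simp only [List.head?_cons, Option.some.injEq] at hq
    simp only [splitParB] at h
    by_cases hc : c = '('
    · rw [if_pos hc] at h
      injection h with h1 _
      rw [← h1]; simp
    · rw [if_neg hc] at h
      cases hs : splitParB cs with
      | nil => rw [hs] at h; injection h with h1 _; rw [← h1]; simpa using hq
      | cons q qs => rw [hs] at h; injection h with h1 _; rw [← h1]; simpa using hq

lemma runB_eq_fSpec (cs : List Char) :
    ∀ (res : List Char) (prev : Option Char),
    (res.getLast? = some '\\' ↔ prev = some '\\') →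
    runB res cs = res ++ fSpec prev cs := by
  induction cs with
  | nil => intro res prev _; simp [runB, splitParB, fSpec]
  | cons c cs ih =>
    intro res prev hinv
    by_cases hc : c = '('
    · subst hc
      obtain ⟨p0, rest, hsplit⟩ : ∃ p0 rest, splitParB cs = p0 :: rest := by
        cases h : splitParB cs with
        | nil => exact absurd h (splitParB_ne_nil cs)
        | cons p ps => exact ⟨p, ps, rfl⟩
      have hsp : splitParB ('(' :: cs) = [] :: p0 :: rest := by
        simp [splitParB, hsplit]
      rw [runB_of_split res _ _ _ hsp]
      simp only [List.foldl_cons, List.append_nil]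
      by_cases hcond : prev ≠ some '\\' ∧ cs.head? ≠ some '?'
      · -- converted: "(?:" is emitted
        have hres : res.getLast? ≠ some '\\' := fun h => hcond.1 (hinv.mp h)
        have hp0 : p0.head? ≠ some '?' := splitParB_head?_ne cs hcond.2 p0 rest hsplit
        have hstep : stepB res p0 = (res ++ ['(', '?', ':']) ++ p0 := by
          simp [stepB, hres, hp0]
        rw [hstep, ← runB_of_split _ _ _ _ hsplit,
            ih (res ++ ['(', '?', ':']) (some '(') (by simp)]
        have hf : fSpec prev ('(' :: cs) = '(' :: '?' :: ':' :: fSpec (some '(') cs := by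
          simp [fSpec, hcond.1, hcond.2]
        rw [hf]; simp
      · -- kept as-is
        have hstep : stepB res p0 = (res ++ ['(']) ++ p0 := by
          rcases not_and_or.mp hcond with h1 | h2
          · have h1 : prev = some '\\' := not_not.mp h1
            have : res.getLast? = some '\\' := hinv.mpr h1
            simp [stepB, this]
          · have h2 : cs.head? = some '?' := not_not.mp h2
            obtain ⟨p, ps, hs, hp⟩ := splitParB_head?_eq cs h2
            rw [hs] at hsplit
            injection hsplit with e1 _
            rw [e1] at hp
            simp [stepB, hp]
        rw [hstep, ← runB_of_split _ _ _ _ hsplit,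
            ih (res ++ ['(']) (some '(') (by simp)]
        have hf : fSpec prev ('(' :: cs) = '(' :: fSpec (some '(') cs := by
          simp [fSpec, hcond]
        rw [hf]; simp
    · -- ordinary character
      obtain ⟨p0, rest, hsplit⟩ : ∃ p0 rest, splitParB cs = p0 :: rest := by
        cases h : splitParB cs with
        | nil => exact absurd h (splitParB_ne_nil cs)
        | cons p ps => exact ⟨p, ps, rfl⟩
      have hsp : splitParB (c :: cs) = (c :: p0) :: rest := by
        simp [splitParB, hc, hsplit]
      rw [runB_of_split res _ _ _ hsp,
          show res ++ c :: p0 = (res ++ [c]) ++ p0 by simp,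
          ← runB_of_split _ _ _ _ hsplit,
          ih (res ++ [c]) (some c) (by simp)]
      have hf : fSpec prev (c :: cs) = c :: fSpec (some c) cs := by
        have hx : ¬ (c = '(' ∧ prev ≠ some '\\' ∧ cs.head? ≠ some '?') := by
          intro ⟨h, _⟩; exact hc h
        simp only [fSpec, if_neg hx]
      rw [hf]; simp

-- A's loop at index i equals the already-emitted prefix plus fSpec on the suffix
lemma loopA_eq_fSpec (cs : List Char) :
    ∀ (n i : Nat) (out : List Char), cs.length - i = n →
    toNoncapLoopA cs i out =
      out ++ fSpec (if i > 0 then some (cs.getD (i - 1) ' ') else none) (cs.drop i) := by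
  intro n
  induction n with
  | zero =>
    intro i out h
    have hi : ¬ i < cs.length := by omega
    rw [toNoncapLoopA, if_neg hi, List.drop_eq_nil_of_le (by omega)]
    simp [fSpec]
  | succ n ih =>
    intro i out h
    have hi : i < cs.length := by omega
    have hdrop : cs.drop i = cs[i] :: cs.drop (i + 1) := List.drop_eq_getElem_cons hi
    have hget : cs.getD i ' ' = cs[i] := by
      simp [List.getD, List.getElem?_eq_getElem hi]
    have hnxt : (if i + 1 < cs.length then some (cs.getD (i + 1) ' ') else none)
        = (cs.drop (i + 1)).head? := by
      rw [List.head?_drop]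
      by_cases h1 : i + 1 < cs.length
      · rw [if_pos h1, List.getElem?_eq_getElem h1]
        simp [List.getD, List.getElem?_eq_getElem h1]
      · rw [if_neg h1, List.getElem?_eq_none (by omega)]
    have hprevnext : (if i + 1 > 0 then some (cs.getD (i + 1 - 1) ' ') else none)
        = some cs[i] := by
      rw [if_pos (by omega)]
      simp only [Nat.add_sub_cancel]
      rw [hget]
    rw [toNoncapLoopA, if_pos hi]
    simp only
    by_cases hcond : cs.getD i ' ' = '(' ∧
        (if i > 0 then some (cs.getD (i - 1) ' ') else none) ≠ some '\\' ∧
        (if i + 1 < cs.length then some (cs.getD (i + 1) ' ') else none) ≠ some '?'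
    · rw [if_pos hcond, ih (i + 1) (out ++ ['(', '?', ':']) (by omega), hprevnext, hdrop]
      have hf : fSpec (if i > 0 then some (cs.getD (i - 1) ' ') else none)
          (cs[i] :: cs.drop (i + 1))
          = '(' :: '?' :: ':' :: fSpec (some cs[i]) (cs.drop (i + 1)) := by
        have hx : cs[i] = '(' ∧
            (if i > 0 then some (cs.getD (i - 1) ' ') else none) ≠ some '\\' ∧
            (cs.drop (i + 1)).head? ≠ some '?' :=
          ⟨hget ▸ hcond.1, hcond.2.1, hnxt ▸ hcond.2.2⟩
        simp only [fSpec, if_pos hx]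
      rw [hf]; simp
    · rw [if_neg hcond, ih (i + 1) (out ++ [cs.getD i ' ']) (by omega), hprevnext, hdrop]
      have hf : fSpec (if i > 0 then some (cs.getD (i - 1) ' ') else none)
          (cs[i] :: cs.drop (i + 1)) = cs[i] :: fSpec (some cs[i]) (cs.drop (i + 1)) := by
        have hx : ¬ (cs[i] = '(' ∧
            (if i > 0 then some (cs.getD (i - 1) ' ') else none) ≠ some '\\' ∧
            (cs.drop (i + 1)).head? ≠ some '?') := by
          intro ⟨h1, h2, h3⟩
          exact hcond ⟨hget ▸ h1, h2, hnxt ▸ h3⟩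
        simp only [fSpec, if_neg hx]
      rw [hf, hget]; simp

lemma ports_agree (cs : List Char) : toNoncapLoopA cs 0 [] = runB [] cs := by
  have hA := loopA_eq_fSpec cs (cs.length - 0) 0 [] rfl
  simp only [List.drop_zero, if_neg (lt_irrefl 0), List.nil_append] at hA
  have hB := runB_eq_fSpec cs [] none (by simp)
  simp only [List.nil_append] at hB
  rw [hA, hB]

-- ===== VERDICT (by name: the statement is the Claim_ definition above) =====
theorem to_noncapturing_py_spec : Claim_equal_to_noncapturing_py := by
  intro expr _
  unfold Spec_to_noncapturing_py to_noncapturing_py to_noncapturing_py_alt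
  rw [ports_agree expr.toList]
  cases h : splitParB expr.toList with
  | nil => exact absurd h (splitParB_ne_nil expr.toList)
  | cons p ps => rw [runB_of_split [] _ _ _ h]; simp
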